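-- pv_equiv track=rewrite | github.com/mizhi/aoc | day3/problem2.py | bitstr_to_int
-- ===== SOURCE A (Python) =====
-- def bitstr_to_int(nums):
--   numi = None
--   for digit in nums:
--     if numi is not None:
--       numi <<= 1
--     else:
--       numi = 0
--     if digit == '1':
--       numi |= 1
--   return numi
-- ===== SOURCE B (Python) =====
-- def bitstr_to_int(nums):
--   if not nums:
--     return None
--   total = 0
--   for i, digit in enumerate(reversed(nums)):
--     if digit == '1':
--       total += 1 << i
--   return total
-- ===== Notes on version B (the rewrite author's own statement) =====
-- stated objective: alternative
-- what changed: B guards the empty case explicitly and iterates right-to-left over enumerate(reversed(nums)), adding positional powers 1<<i for '1' digits, instead of A's None-sentinel loop with a running left-shift/or accumulator.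
import Mathlib
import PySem

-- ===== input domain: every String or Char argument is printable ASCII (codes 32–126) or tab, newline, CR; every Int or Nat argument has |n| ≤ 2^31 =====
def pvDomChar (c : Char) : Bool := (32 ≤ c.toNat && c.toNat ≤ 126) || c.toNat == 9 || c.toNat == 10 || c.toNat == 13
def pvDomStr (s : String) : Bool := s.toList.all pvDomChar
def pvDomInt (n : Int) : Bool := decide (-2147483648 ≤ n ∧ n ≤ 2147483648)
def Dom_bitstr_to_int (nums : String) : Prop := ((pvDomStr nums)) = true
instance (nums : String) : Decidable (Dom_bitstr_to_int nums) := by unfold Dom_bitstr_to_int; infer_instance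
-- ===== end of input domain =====

-- B re-implements bitstr_to_int with an explicit empty guard and a right-to-left
-- positional-power accumulation instead of A's None-sentinel shift/or loop (alternative, same cost).


-- ===== PORT A =====
-- loop body of A: if numi is not None: numi <<= 1 else: numi = 0; if digit == '1': numi |= 1
def bitstr_to_int_step (numi : Option Int) (digit : Char) : Option Int :=
  let v : Int := match numi with
    | some v => v <<< (1 : Nat)
    | none => 0
  some (if digit = '1' then PySem.Int.bor v 1 else v)

def bitstr_to_int (nums : String) : Option Int :=
  nums.toList.foldl bitstr_to_int_step none

-- ===== PORT B =====
-- 1 << i with i ≥ 0 (an enumerate index) is ported as (1 : Int) <<< i.toNat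
def bitstr_to_int_alt (nums : String) : Option Int :=
  if nums.toList = [] then none
  else
    some ((PySem.List.enumerate nums.toList.reverse 0).foldl
      (fun total p => if p.2 = '1' then total + ((1 : Int) <<< p.1.toNat) else total) 0)

-- ===== PRECONDITION & SPEC =====
def Spec_bitstr_to_int (nums : String) (out : Option Int) : Prop := out = bitstr_to_int_alt nums
instance (nums : String) (out : Option Int) : Decidable (Spec_bitstr_to_int nums out) := by unfold Spec_bitstr_to_int; infer_instance

-- ===== CLAIM (what is proved, stated in full; the proofs are below) =====
def Claim_equal_bitstr_to_int : Prop := ∀ (nums : String), Dom_bitstr_to_int nums → Spec_bitstr_to_int nums (bitstr_to_int nums)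

-- ===== LEMMAS AND PROOFS =====

def pvBit (c : Char) : Int := if c = '1' then 1 else 0

def pvBitA (v : Int) (l : List Char) : Int := l.foldl (fun a c => 2 * a + pvBit c) v

theorem pv_nat_two_mul_lor_one (n : Nat) : (2 * n) ||| 1 = 2 * n + 1 := by
  apply Nat.eq_of_testBit_eq
  intro i
  rw [Nat.testBit_lor]
  cases i with
  | zero => simp [Nat.testBit_zero]
  | succ i =>
    rw [Nat.testBit_succ, Nat.testBit_succ, Nat.testBit_succ]
    have h1 : 2 * n / 2 = n := by omega
    have h2 : (2 * n + 1) / 2 = n := by omega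
    have h3 : 1 / 2 = 0 := by omega
    rw [h1, h2, h3]
    simp

theorem pv_bor_two_mul_one (v : Int) (h : 0 ≤ v) : PySem.Int.bor (2 * v) 1 = 2 * v + 1 := by
  rw [PySem.Int.bor_of_nonneg (by omega) (by omega)]
  have h1 : (2 * v).toNat = 2 * v.toNat := by omega
  have h2 : (1 : Int).toNat = 1 := rfl
  rw [h1, h2, pv_nat_two_mul_lor_one]
  omega

theorem pv_bit_nonneg (c : Char) : 0 ≤ pvBit c := by
  unfold pvBit; split <;> omega

theorem pv_stepA_some (v : Int) (h : 0 ≤ v) (c : Char) :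
    bitstr_to_int_step (some v) c = some (2 * v + pvBit c) := by
  show some (if c = '1' then PySem.Int.bor (v <<< (1 : Nat)) 1 else v <<< (1 : Nat)) = _
  rw [Int.shiftLeft_eq, show v * 2 ^ 1 = 2 * v by ring]
  unfold pvBit
  split
  · rw [pv_bor_two_mul_one v h]
  · congr 1; omega

theorem pv_foldA_some (l : List Char) : ∀ v : Int, 0 ≤ v →
    l.foldl bitstr_to_int_step (some v) = some (pvBitA v l) := by
  induction l with
  | nil => intro v _; rfl
  | cons c r ih =>
    intro v hv
    rw [List.foldl_cons, pv_stepA_some v hv c]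
    exact ih _ (by have := pv_bit_nonneg c; omega)

theorem pv_bitA_shift (l : List Char) : ∀ v : Int,
    pvBitA v l = v * 2 ^ l.length + pvBitA 0 l := by
  induction l with
  | nil => intro v; simp [pvBitA]
  | cons c r ih =>
    intro v
    show pvBitA (2 * v + pvBit c) r = v * 2 ^ (r.length + 1) + pvBitA (2 * 0 + pvBit c) r
    rw [ih (2 * v + pvBit c), ih (2 * 0 + pvBit c)]
    ring

theorem pv_main (l : List Char) :
    pvBitA 0 l = (PySem.List.enumerate l.reverse 0).foldl
      (fun total p => if p.2 = '1' then total + ((1 : Int) <<< p.1.toNat) else total) 0 := by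
  induction l with
  | nil => rfl
  | cons c r ih =>
    rw [show (c :: r).reverse = r.reverse ++ [c] by simp,
        PySem.List.enumerate_append, List.foldl_append]
    show pvBitA (2 * 0 + pvBit c) r = _
    rw [pv_bitA_shift r (2 * 0 + pvBit c), ← ih]
    simp only [PySem.List.enumerate, List.foldl_cons, List.foldl_nil]
    unfold pvBit
    split
    · rw [Int.one_shiftLeft]
      have hn : ((0 : Int) + (r.reverse.length : Int)).toNat = r.length := by simp
      rw [hn]
      push_cast
      ring
    · simp

-- ===== VERDICT (by name: the statement is the Claim_ definition above) =====
theorem bitstr_to_int_spec : Claim_equal_bitstr_to_int := by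
  intro nums _
  unfold Spec_bitstr_to_int bitstr_to_int bitstr_to_int_alt
  cases h : nums.toList with
  | nil => simp
  | cons c r =>
    rw [if_neg (by simp), List.foldl_cons]
    have h0 : bitstr_to_int_step none c = some (2 * 0 + pvBit c) := by
      show some (if c = '1' then PySem.Int.bor 0 1 else 0) = _
      unfold pvBit
      split
      · rw [PySem.Int.bor_of_nonneg (by omega) (by omega)]; rfl
      · rfl
    rw [h0, pv_foldA_some r _ (by have := pv_bit_nonneg c; omega)]
    rw [show pvBitA (2 * 0 + pvBit c) r = pvBitA 0 (c :: r) from rfl, pv_main (c :: r)]
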